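-- pv_equiv track=rewrite | github.com/ibrohim0205/1.py | 4.py | has_single_continuous_segment
-- ===== SOURCE A (Python) =====
-- def has_single_continuous_segment(s):
--     ones_count = 0
--     continuous_segments = 0
--
--     for char in s:
--         if char == '1':
--             ones_count += 1
--         else:
--             ones_count = 0
--
--         if ones_count > 1:
--             continuous_segments += 1
--
--     return continuous_segments == 1
-- ===== SOURCE B (Python) =====
-- def has_single_continuous_segment(s):
--     ones = s.count('1')
--     runs = len([c for p, c in zip(' ' + s, s) if c == '1' and p != '1'])
--     return ones - runs == 1
-- ===== Notes on version B (the rewrite author's own statement) =====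
-- stated objective: simpler
-- what changed: Replaces A's running reset-on-zero accumulator (which counts positions whose current run length exceeds one) by two independent counts - the total number of one-characters and the number of maximal runs of them, the latter via zip against the shifted string - returning ones - runs == 1.
import Mathlib
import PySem

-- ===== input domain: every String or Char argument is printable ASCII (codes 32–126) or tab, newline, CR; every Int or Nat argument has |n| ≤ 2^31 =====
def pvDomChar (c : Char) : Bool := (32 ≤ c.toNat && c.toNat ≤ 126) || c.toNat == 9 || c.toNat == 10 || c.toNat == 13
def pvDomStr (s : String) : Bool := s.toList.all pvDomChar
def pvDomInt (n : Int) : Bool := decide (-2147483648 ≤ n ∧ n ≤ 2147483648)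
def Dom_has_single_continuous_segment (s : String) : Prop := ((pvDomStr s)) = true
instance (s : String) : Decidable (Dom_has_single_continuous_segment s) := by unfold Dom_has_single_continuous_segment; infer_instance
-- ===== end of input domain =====

-- B counts total '1's and maximal '1'-runs separately instead of A's reset-on-zero accumulator; same values, simpler decomposition.

-- ===== PORT A =====
def has_single_continuous_segment (s : String) : Bool :=
  let st := s.toList.foldl (fun (st : Int × Int) c =>
    let ones := if c == '1' then st.1 + 1 else (0 : Int)
    let segs := if ones > 1 then st.2 + 1 else st.2
    (ones, segs)) (0, 0)
  st.2 == 1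

-- ===== PORT B =====
def has_single_continuous_segment_alt (s : String) : Bool :=
  let l := s.toList
  let ones : Int := l.count '1'
  let runs : Int := ((List.zip (' ' :: l) l).filter (fun pc => pc.2 == '1' && pc.1 != '1')).length
  ones - runs == 1

-- ===== PRECONDITION & SPEC =====
def Spec_has_single_continuous_segment (s : String) (out : Bool) : Prop := out = has_single_continuous_segment_alt s
instance (s : String) (out : Bool) : Decidable (Spec_has_single_continuous_segment s out) := by unfold Spec_has_single_continuous_segment; infer_instance

-- ===== CLAIM (what is proved, stated in full; the proofs are below) =====
def Claim_equal_has_single_continuous_segment : Prop := ∀ (s : String), Dom_has_single_continuous_segment s → Spec_has_single_continuous_segment s (has_single_continuous_segment s)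

-- ===== LEMMAS AND PROOFS =====

theorem pv_key (l : List Char) : ∀ (o a : Int) (p : Char), 0 ≤ o → ((0 < o) ↔ (p = '1')) →
    (l.foldl (fun (st : Int × Int) c =>
      let ones := if c == '1' then st.1 + 1 else (0 : Int)
      let segs := if ones > 1 then st.2 + 1 else st.2
      (ones, segs)) (o, a)).2
    = a + (l.count '1' : Int)
      - (((List.zip (p :: l) l).filter (fun pc => pc.2 == '1' && pc.1 != '1')).length : Int) := by
  induction l with
  | nil => intro o a p _ _; simp
  | cons c t ih =>
    intro o a p ho hp
    simp only [List.foldl_cons, List.zip_cons_cons, List.filter_cons, List.count_cons]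
    by_cases hc : c = '1'
    · subst hc
      simp only [beq_self_eq_true, if_true]
      by_cases hpo : 0 < o
      · have hp1 : p = '1' := hp.mp hpo
        subst hp1
        rw [if_pos (show (o:Int)+1 > 1 by omega)]
        rw [ih (o+1) (a+1) '1' (by omega) (by simp; omega)]
        simp; ring
      · have ho0 : o = 0 := by omega
        subst ho0
        have hp1 : p ≠ '1' := fun h => hpo (hp.mpr h)
        rw [if_neg (show ¬((0:Int)+1 > 1) by omega)]
        rw [ih (0+1) a '1' (by omega) (by simp)]
        have : (p != '1') = true := by simp [hp1]
        simp [this]; ring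
    · have hcb : (c == '1') = false := by simp [hc]
      simp only [hcb, Bool.false_and, Bool.false_eq_true, if_false]
      rw [if_neg (show ¬((0:Int) > 1) by omega)]
      rw [ih 0 a c le_rfl (by simp [hc])]
      simp

-- ===== VERDICT (by name: the statement is the Claim_ definition above) =====
theorem has_single_continuous_segment_spec : Claim_equal_has_single_continuous_segment := by
  intro s _
  unfold Spec_has_single_continuous_segment
  simp only [has_single_continuous_segment, has_single_continuous_segment_alt,
    pv_key s.toList 0 0 ' ' le_rfl (by simp)]
  simp
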